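-- pv_equiv track=rewrite | github.com/Ricardo1335/Sistema-cuantico-de-una-particula-en-una-linea | libreriadecomplejos.py | sumacompvector
-- ===== SOURCE A (Python) =====
-- def sumacomplejos(a,b):
--
--     return [a[0]+b[0],a[1]+b[1]]
--
-- def sumacompvector(v1):
--     if len(v1) < 2 :
--         return v1[0]
--     elif len(v1) == 2:
--         s = sumacomplejos(v1[0],v1[1])
--         return s
--     else:
--         s = sumacomplejos(v1[0],v1[1])
--         for i in range (2,len(v1)):
--             s = sumacomplejos(s,v1[i])
--         return s
-- ===== SOURCE B (Python) =====
-- def sumacompvector(v1):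
--     if len(v1) < 2:
--         return v1[0]
--     return [sum(p[0] for p in v1), sum(p[1] for p in v1)]
-- ===== Notes on version B (the rewrite author's own statement) =====
-- stated objective: idiomatic
-- what changed: Replaces the running pairwise fold via sumacomplejos with two independent per-coordinate column sums using the built-in sum, keeping the len<2 guard.
import Mathlib
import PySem

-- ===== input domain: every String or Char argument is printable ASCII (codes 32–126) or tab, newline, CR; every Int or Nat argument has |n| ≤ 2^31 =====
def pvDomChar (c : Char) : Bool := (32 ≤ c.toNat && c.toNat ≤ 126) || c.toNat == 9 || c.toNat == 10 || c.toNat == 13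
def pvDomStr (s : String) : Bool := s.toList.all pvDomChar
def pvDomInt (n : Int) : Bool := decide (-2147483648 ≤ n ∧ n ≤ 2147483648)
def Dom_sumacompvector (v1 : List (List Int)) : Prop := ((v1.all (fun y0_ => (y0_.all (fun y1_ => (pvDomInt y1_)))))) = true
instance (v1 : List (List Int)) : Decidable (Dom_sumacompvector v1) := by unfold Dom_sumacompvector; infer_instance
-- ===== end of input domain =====

-- B replaces A's running pairwise fold with two per-coordinate column sums (idiomatic decomposition).

-- ===== PORT A =====
def sumacomplejos (a b : List Int) : List Int :=
  [PySem.List.pyGetD a 0 0 + PySem.List.pyGetD b 0 0,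
   PySem.List.pyGetD a 1 0 + PySem.List.pyGetD b 1 0]

def sumacompvector (v1 : List (List Int)) : List Int :=
  if v1.length < 2 then PySem.List.pyGetD v1 0 []
  else if v1.length = 2 then
    sumacomplejos (PySem.List.pyGetD v1 0 []) (PySem.List.pyGetD v1 1 [])
  else
    (PySem.List.pyRange 2 v1.length 1).foldl
      (fun s i => sumacomplejos s (PySem.List.pyGetD v1 i []))
      (sumacomplejos (PySem.List.pyGetD v1 0 []) (PySem.List.pyGetD v1 1 []))

-- ===== PORT B =====
def sumacompvector_alt (v1 : List (List Int)) : List Int :=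
  if v1.length < 2 then PySem.List.pyGetD v1 0 []
  else [(v1.map (fun p => PySem.List.pyGetD p 0 0)).sum,
        (v1.map (fun p => PySem.List.pyGetD p 1 0)).sum]

-- ===== PRECONDITION & SPEC =====
-- Pre_: v1 nonempty (empty raises IndexError in both), and when len ≥ 2 every
-- element has at least two coordinates (else both raise IndexError in sumacomplejos / sum).
def Pre_sumacompvector (v1 : List (List Int)) : Prop :=
  v1 ≠ [] ∧ (2 ≤ v1.length → ∀ p ∈ v1, 2 ≤ p.length)
instance (v1 : List (List Int)) : Decidable (Pre_sumacompvector v1) := by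
  unfold Pre_sumacompvector; infer_instance

def pvWitness_sumacompvector : List (List Int) := [[1, 2], [3, 4], [5, 6]]

def Spec_sumacompvector (v1 : List (List Int)) (out : List Int) : Prop := out = sumacompvector_alt v1
instance (v1 : List (List Int)) (out : List Int) : Decidable (Spec_sumacompvector v1 out) := by unfold Spec_sumacompvector; infer_instance

-- ===== CLAIM (what is proved, stated in full; the proofs are below) =====
def Claim_equal_sumacompvector : Prop := ∀ (v1 : List (List Int)), Dom_sumacompvector v1 → Pre_sumacompvector v1 → Spec_sumacompvector v1 (sumacompvector v1)

-- ===== LEMMAS AND PROOFS =====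

-- Folding sumacomplejos over a list of pairs accumulates each coordinate independently.
theorem foldl_sumacomplejos (rest : List (List Int)) (x y : Int) :
    rest.foldl sumacomplejos [x, y]
      = [x + (rest.map (fun p => PySem.List.pyGetD p 0 0)).sum,
         y + (rest.map (fun p => PySem.List.pyGetD p 1 0)).sum] := by
  induction rest generalizing x y with
  | nil => simp
  | cons p rest ih =>
    simp only [List.foldl_cons, List.map_cons, List.sum_cons]
    have : sumacomplejos [x, y] p
        = [x + PySem.List.pyGetD p 0 0, y + PySem.List.pyGetD p 1 0] := by
      simp [sumacomplejos, PySem.List.pyGetD]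
    rw [this, ih]
    ring_nf

-- ===== VERDICT (by name: the statement is the Claim_ definition above) =====
theorem sumacompvector_spec : Claim_equal_sumacompvector := by
  intro v1 _ _
  unfold Spec_sumacompvector sumacompvector sumacompvector_alt
  by_cases h : v1.length < 2
  · simp [h]
  · simp only [h, if_false]
    obtain ⟨a, b, rest, rfl⟩ : ∃ a b rest, v1 = a :: b :: rest := by
      cases v1 with
      | nil => simp at h
      | cons a t =>
        cases t with
        | nil => simp at h
        | cons b rest => exact ⟨a, b, rest, rfl⟩
    have hfold :
        (PySem.List.pyRange 2 (a :: b :: rest).length 1).foldl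
            (fun s i => sumacomplejos s (PySem.List.pyGetD (a :: b :: rest) i []))
            (sumacomplejos a b)
          = rest.foldl sumacomplejos (sumacomplejos a b) := by
      have := PySem.List.foldl_pyRange_pyGetD (a := 2) (a :: b :: rest) ([] : List Int)
        sumacomplejos (sumacomplejos a b) (by omega)
      simpa using this
    have hs : sumacomplejos a b
          = [PySem.List.pyGetD a 0 0 + PySem.List.pyGetD b 0 0,
             PySem.List.pyGetD a 1 0 + PySem.List.pyGetD b 1 0] := rfl
    have ga : PySem.List.pyGetD (a :: b :: rest) 0 [] = a := by
      rw [show (0:Int) = ((0:Nat):Int) from rfl, PySem.List.pyGetD_natCast]; simp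
    have gb : PySem.List.pyGetD (a :: b :: rest) 1 [] = b := by
      rw [show (1:Int) = ((1:Nat):Int) from rfl, PySem.List.pyGetD_natCast]; simp
    by_cases h2 : (a :: b :: rest).length = 2
    · have : rest = [] := by
        cases rest with
        | nil => rfl
        | cons _ _ => simp at h2
      subst this
      simp only [h2, ga, gb, hs]
      simp
    · simp only [h2, if_false, ga, gb]
      rw [hfold, hs, foldl_sumacomplejos]
      simp
      constructor <;> ring
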